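-- pv_equiv track=rewrite | github.com/markyao6275/grow-automatch | score_candidates.py | get_I4_and_F4_points
-- ===== SOURCE A (Python) =====
-- from math import ceil
--
-- def get_I4_and_F4_points(candidate_data, job_data):
--     if (
--         not candidate_data.get("final_I") == "I4"
--         or not candidate_data.get("final_F") == "F4"
--     ):
--         return 0
--
--     def _calculate_points(candidate_tags, job_tags):
--         # Convert to sets so duplicates in either list won't affect bracket or scoring
--         unique_candidate_tags = set(candidate_tags)
--         unique_job_tags = set(job_tags)
--         max_points = 15
--
--         points = 0
--         job_tags_count = len(unique_job_tags)
--
--         # No job tags => max_points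
--         if job_tags_count == 0:
--             points = max_points
--         # Exactly 1 job tag => if it matches, award max_points
--         elif job_tags_count == 1:
--             if unique_job_tags.pop() in unique_candidate_tags:
--                 points = max_points
--         # Exactly 2 job tags => each matching tag awards max_points/2
--         elif job_tags_count == 2:
--             for tag in unique_job_tags:
--                 if tag in unique_candidate_tags:
--                     points += ceil(max_points / 2)
--         # More than 2 job tags => each matching tag awards max_points/3
--         else:
--             for tag in unique_job_tags:
--                 if tag in unique_candidate_tags:
--                     points += ceil(max_points / 3)
--
--         # Cap the points at max_points
--         return min(points, max_points)
--
--     candidate_i4 = candidate_data.get("i4")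
--     candidate_f4 = candidate_data.get("f4")
--     job_i4 = job_data.get("i4")
--     job_f4 = job_data.get("f4")
--
--     candidate_f4_tags = [keyword.strip() for keyword in candidate_f4.split(",")]
--     candidate_i4_tags = [keyword.strip() for keyword in candidate_i4.split(",")]
--     job_f4_tags = [keyword.strip() for keyword in job_f4.split(",")]
--     job_i4_tags = [keyword.strip() for keyword in job_i4.split(",")]
--
--     f4_points = _calculate_points(candidate_f4_tags, job_f4_tags)
--     i4_points = _calculate_points(candidate_i4_tags, job_i4_tags)
--
--     return f4_points + i4_points
-- ===== SOURCE B (Python) =====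
-- def get_I4_and_F4_points(candidate_data, job_data):
--     if candidate_data.get("final_I") != "I4" or candidate_data.get("final_F") != "F4":
--         return 0
--
--     def _score(cand_str, job_str):
--         # sorted unique tag lists; count common tags with a two-pointer merge scan
--         cand = sorted({t.strip() for t in cand_str.split(",")})
--         job = sorted({t.strip() for t in job_str.split(",")})
--         n = len(job)
--         if n == 0:
--             return 15
--         per_tag = 15 if n == 1 else 8 if n == 2 else 5
--         matches = 0
--         i = j = 0
--         while i < len(cand) and j < len(job):
--             if cand[i] < job[j]:
--                 i += 1
--             elif cand[i] > job[j]: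
--                 j += 1
--             else:
--                 matches += 1
--                 i += 1
--                 j += 1
--         return min(matches * per_tag, 15)
--
--     return (_score(candidate_data.get("f4"), job_data.get("f4"))
--             + _score(candidate_data.get("i4"), job_data.get("i4")))
-- ===== Notes on version B (the rewrite author's own statement) =====
-- stated objective: alternative
-- what changed: Replaces the four-way branch that accumulates bracketed points via set-membership tests with a sort-then-merge algorithm: the deduplicated tag lists are sorted and the common tags are counted by a two-pointer merge scan (no membership lookup at all), then the score is the closed form min(matches * per_tag, 15) with per_tag read off the unique-job-tag count.
import Mathlib
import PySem

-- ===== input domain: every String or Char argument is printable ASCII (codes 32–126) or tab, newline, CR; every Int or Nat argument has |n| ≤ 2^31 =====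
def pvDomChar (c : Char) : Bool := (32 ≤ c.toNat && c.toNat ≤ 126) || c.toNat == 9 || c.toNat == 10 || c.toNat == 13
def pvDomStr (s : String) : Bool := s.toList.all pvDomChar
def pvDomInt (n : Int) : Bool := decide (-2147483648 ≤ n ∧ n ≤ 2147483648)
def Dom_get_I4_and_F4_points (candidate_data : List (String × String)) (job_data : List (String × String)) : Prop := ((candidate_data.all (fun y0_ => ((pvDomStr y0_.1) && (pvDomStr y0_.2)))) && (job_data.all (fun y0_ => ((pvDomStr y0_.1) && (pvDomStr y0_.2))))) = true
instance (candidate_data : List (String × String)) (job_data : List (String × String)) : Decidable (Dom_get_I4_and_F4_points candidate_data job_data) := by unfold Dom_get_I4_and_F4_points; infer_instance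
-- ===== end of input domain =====

-- B replaces A's membership-loop scoring by sort-then-merge: sorted unique tag lists, common tags
-- counted by a two-pointer merge scan, score = min(matches * per_tag, 15); objective: alternative.
-- The equivalence is about return values; neither program mutates its arguments.

-- ===== PORT A =====
-- _calculate_points: ceil(15/2) = 8 and ceil(15/3) = 5 are constant-folded (exact).
-- On a one-element set, set.pop() returns its unique element = headI; the two folds over the
-- set's elements compute an order-independent sum, so iterating the PySem.Set list is exact.
def pvCalcA (candidate_tags job_tags : List String) : Int :=
  let unique_candidate_tags : PySem.Set String := PySem.Set.ofList candidate_tags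
  let unique_job_tags : PySem.Set String := PySem.Set.ofList job_tags
  let max_points : Int := 15
  let job_tags_count : Int := PySem.Set.len unique_job_tags
  let points : Int :=
    if job_tags_count == 0 then max_points
    else if job_tags_count == 1 then
      (if PySem.Set.contains unique_candidate_tags unique_job_tags.headI then max_points else 0)
    else if job_tags_count == 2 then
      unique_job_tags.foldl
        (fun p tag => if PySem.Set.contains unique_candidate_tags tag then p + 8 else p) 0
    else
      unique_job_tags.foldl
        (fun p tag => if PySem.Set.contains unique_candidate_tags tag then p + 5 else p) 0
  min points max_points

-- s.split(",") : the separator is nonempty, so split? is always some; .getD [] never fires.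
-- .get("i4") etc. can be None (A then raises AttributeError); Pre_ excludes that, so .getD "" never fires.
def get_I4_and_F4_points (candidate_data : List (String × String)) (job_data : List (String × String)) : Int :=
  let cd := PySem.Dict.mk candidate_data
  let jd := PySem.Dict.mk job_data
  if !(cd.get? "final_I" == some "I4") || !(cd.get? "final_F" == some "F4") then 0
  else
    let candidate_i4 := (cd.get? "i4").getD ""
    let candidate_f4 := (cd.get? "f4").getD ""
    let job_i4 := (jd.get? "i4").getD ""
    let job_f4 := (jd.get? "f4").getD ""
    let candidate_f4_tags := ((PySem.Str.split? candidate_f4 ",").getD []).map PySem.Str.strip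
    let candidate_i4_tags := ((PySem.Str.split? candidate_i4 ",").getD []).map PySem.Str.strip
    let job_f4_tags := ((PySem.Str.split? job_f4 ",").getD []).map PySem.Str.strip
    let job_i4_tags := ((PySem.Str.split? job_i4 ",").getD []).map PySem.Str.strip
    let f4_points := pvCalcA candidate_f4_tags job_f4_tags
    let i4_points := pvCalcA candidate_i4_tags job_i4_tags
    f4_points + i4_points

-- ===== PORT B =====
-- the two-pointer merge scan of Source B's while-loop, as recursion on the two sorted lists
def pvMergeCount : List String → List String → Int
  | [], _ => 0
  | _ :: _, [] => 0
  | a :: as, b :: bs =>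
    if a < b then pvMergeCount as (b :: bs)
    else if b < a then pvMergeCount (a :: as) bs
    else 1 + pvMergeCount as bs

def pvScoreB (cand_str job_str : String) : Int :=
  let cand := PySem.List.sorted
    (PySem.Set.ofList (((PySem.Str.split? cand_str ",").getD []).map PySem.Str.strip)) (fun x => x) false
  let job := PySem.List.sorted
    (PySem.Set.ofList (((PySem.Str.split? job_str ",").getD []).map PySem.Str.strip)) (fun x => x) false
  let n : Int := PySem.List.len job
  if n == 0 then 15
  else
    let per_tag : Int := if n == 1 then 15 else if n == 2 then 8 else 5
    min (pvMergeCount cand job * per_tag) 15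

def get_I4_and_F4_points_alt (candidate_data : List (String × String)) (job_data : List (String × String)) : Int :=
  let cd := PySem.Dict.mk candidate_data
  let jd := PySem.Dict.mk job_data
  if !(cd.get? "final_I" == some "I4") || !(cd.get? "final_F" == some "F4") then 0
  else
    pvScoreB ((cd.get? "f4").getD "") ((jd.get? "f4").getD "")
      + pvScoreB ((cd.get? "i4").getD "") ((jd.get? "i4").getD "")

-- ===== PRECONDITION & SPEC =====
-- When the final_I/final_F guard passes, A calls .split on the "i4"/"f4" values of both dicts;
-- Pre_ excludes exactly the inputs where one of those keys is missing (get returns None and A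
-- raises AttributeError).  A returns on every input satisfying Pre_.
def Pre_get_I4_and_F4_points (candidate_data : List (String × String)) (job_data : List (String × String)) : Prop :=
  ((PySem.Dict.mk candidate_data).get? "final_I" = some "I4" ∧
   (PySem.Dict.mk candidate_data).get? "final_F" = some "F4") →
  ((PySem.Dict.mk candidate_data).contains "i4" = true ∧
   (PySem.Dict.mk candidate_data).contains "f4" = true ∧
   (PySem.Dict.mk job_data).contains "i4" = true ∧
   (PySem.Dict.mk job_data).contains "f4" = true)
instance (candidate_data : List (String × String)) (job_data : List (String × String)) : Decidable (Pre_get_I4_and_F4_points candidate_data job_data) := by unfold Pre_get_I4_and_F4_points; infer_instance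

def pvWitness_get_I4_and_F4_points : (List (String × String)) × (List (String × String)) :=
  ([("final_I", "I4"), ("final_F", "F4"), ("i4", "a, b"), ("f4", "x,y,z")],
   [("i4", "b , c"), ("f4", "x, q, z, w")])

def Spec_get_I4_and_F4_points (candidate_data : List (String × String)) (job_data : List (String × String)) (out : Int) : Prop := out = get_I4_and_F4_points_alt candidate_data job_data
instance (candidate_data : List (String × String)) (job_data : List (String × String)) (out : Int) : Decidable (Spec_get_I4_and_F4_points candidate_data job_data out) := by unfold Spec_get_I4_and_F4_points; infer_instance

-- ===== CLAIM (what is proved, stated in full; the proofs are below) =====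
def Claim_equal_get_I4_and_F4_points : Prop := ∀ (candidate_data : List (String × String)) (job_data : List (String × String)), Dom_get_I4_and_F4_points candidate_data job_data → Pre_get_I4_and_F4_points candidate_data job_data → Spec_get_I4_and_F4_points candidate_data job_data (get_I4_and_F4_points candidate_data job_data)

-- ===== LEMMAS AND PROOFS =====

-- An accumulation loop that adds c per matching element is c times the number of matches.
theorem pv_foldl_count (P : String → Bool) (c : Int) :
    ∀ (l : List String) (i : Int),
      l.foldl (fun p tag => if P tag then p + c else p) i
        = i + c * ((l.filter P).length : Int) := by
  intro l
  induction l with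
  | nil => intro i; simp
  | cons a tl ih =>
    intro i
    by_cases h : P a = true
    · simp [List.foldl, h, ih]; ring
    · simp [List.foldl, h, ih]

-- A's scoring, as the closed form: matches (a filter count over the job set) times the
-- per-tag bracket value, capped at 15.
theorem pv_calc_eq (ct jt : List String) :
    pvCalcA ct jt
      = (let C : PySem.Set String := PySem.Set.ofList ct
         let J : PySem.Set String := PySem.Set.ofList jt
         let n : Int := PySem.Set.len J
         if n == 0 then 15
         else
           let per_tag : Int := if n == 1 then 15 else if n == 2 then 8 else 5
           min (((J.filter (fun t => PySem.Set.contains C t)).length : Int) * per_tag) 15) := by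
  unfold pvCalcA PySem.Set.len
  generalize PySem.Set.ofList ct = C
  generalize PySem.Set.ofList jt = J
  simp only []
  match J with
  | [] => simp
  | [a] =>
    by_cases h : a ∈ C <;>
      simp [PySem.Set.contains, List.contains_eq_mem, List.headI, List.filter, h]
  | a :: b :: tl =>
    have hlen : ((a :: b :: tl).length : Int) ≠ 0 ∧ ((a :: b :: tl).length : Int) ≠ 1 := by
      constructor <;> simp [List.length] <;> omega
    rcases hlen with ⟨h0, h1⟩
    by_cases h2 : ((a :: b :: tl).length : Int) = 2
    · simp only [h2, beq_iff_eq, if_true, beq_self_eq_true]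
      rw [pv_foldl_count (fun tag => PySem.Set.contains C tag) 8]
      simp [Int.mul_comm]
    · simp only [beq_iff_eq, if_neg h0, if_neg h1, if_neg h2]
      rw [pv_foldl_count (fun tag => PySem.Set.contains C tag) 5]
      simp [Int.mul_comm]

-- The merge scan over two strictly increasing lists counts exactly the elements of the
-- second list that occur in the first.
theorem pv_merge_eq :
    ∀ (X Y : List String), X.Pairwise (· < ·) → Y.Pairwise (· < ·) →
      pvMergeCount X Y = ((Y.filter (fun t => X.contains t)).length : Int) := by
  intro X Y hX hY
  induction X, Y using pvMergeCount.induct with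
  | case1 Y => simp [pvMergeCount]
  | case2 a as => simp [pvMergeCount]
  | case3 a as b bs hab ih =>
    rw [List.pairwise_cons] at hY
    have hfc : ∀ y ∈ b :: bs, ((a :: as).contains y) = (as.contains y) := by
      intro y hy
      have hay : a < y := by
        rcases hy with _ | hmem
        · exact hab
        · exact lt_trans hab (hY.1 y (by assumption))
      simp [(ne_of_lt hay).symm]
    rw [List.filter_congr hfc,
        pvMergeCount, if_pos hab,
        ih (List.Pairwise.of_cons hX) (List.pairwise_cons.mpr hY)]
  | case4 a as b bs hab hba ih =>
    rw [List.pairwise_cons] at hX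
    have hbn : ((a :: as).contains b) = false := by
      have : ∀ x ∈ a :: as, b < x := by
        intro x hx
        rcases hx with _ | hmem
        · exact hba
        · exact lt_trans hba (hX.1 x (by assumption))
      simp only [List.contains_eq_mem, decide_eq_false_iff_not]
      intro hmem
      exact lt_irrefl b (this b hmem)
    rw [pvMergeCount, if_neg hab, if_pos hba,
        ih (List.pairwise_cons.mpr hX) (List.Pairwise.of_cons hY),
        List.filter_cons_of_neg (by simpa [List.contains_eq_mem, not_or] using hbn)]
  | case5 a as b bs hab hba ih =>
    have heq : a = b := le_antisymm (not_lt.mp hba) (not_lt.mp hab)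
    subst heq
    rw [List.pairwise_cons] at hX
    rw [List.pairwise_cons] at hY
    have hfc : ∀ y ∈ bs, ((a :: as).contains y) = (as.contains y) := by
      intro y hy
      have hay : a < y := hY.1 y hy
      simp [(ne_of_lt hay).symm]
    rw [pvMergeCount, if_neg hab, if_neg hba,
        ih hX.2 hY.2, List.filter_cons_of_pos (by simp), List.filter_congr hfc]
    simp only [List.length_cons]
    push_cast
    ring

-- B's score equals A's _calculate_points on the stripped tag lists.
theorem pv_score_eq (cs js : String) :
    pvCalcA (((PySem.Str.split? cs ",").getD []).map PySem.Str.strip)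
            (((PySem.Str.split? js ",").getD []).map PySem.Str.strip)
      = pvScoreB cs js := by
  rw [pv_calc_eq]
  unfold pvScoreB
  simp only []
  generalize hC : PySem.Set.ofList (((PySem.Str.split? cs ",").getD []).map PySem.Str.strip) = C
  generalize hJ : PySem.Set.ofList (((PySem.Str.split? js ",").getD []).map PySem.Str.strip) = J
  have hlen : PySem.List.len (PySem.List.sorted J (fun x => x) false) = PySem.Set.len J := by
    simp [PySem.List.len_eq, PySem.Set.len, PySem.List.length_sorted]
  rw [hlen]
  by_cases h0 : (PySem.Set.len J == 0) = true
  · rw [if_pos h0, if_pos h0]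
  · rw [if_neg h0, if_neg h0]
    have hmerge : pvMergeCount (PySem.List.sorted C (fun x => x) false)
        (PySem.List.sorted J (fun x => x) false)
        = ((J.filter (fun t => PySem.Set.contains C t)).length : Int) := by
      rw [pv_merge_eq _ _ (hC ▸ PySem.List.sorted_ofList_pairwise_lt _)
            (hJ ▸ PySem.List.sorted_ofList_pairwise_lt _)]
      have hpred : ∀ y ∈ PySem.List.sorted J (fun x => x) false,
          ((PySem.List.sorted C (fun x => x) false).contains y) = PySem.Set.contains C y := by
        intro y _
        simp [PySem.Set.contains, List.contains_eq_mem, PySem.List.mem_sorted]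
      rw [List.filter_congr hpred]
      have := (PySem.List.sorted_perm J (fun x => x) false).filter
        (fun t => PySem.Set.contains C t)
      rw [this.length_eq]
    rw [hmerge]

-- ===== VERDICT (by name: the statement is the Claim_ definition above) =====
theorem get_I4_and_F4_points_spec : Claim_equal_get_I4_and_F4_points := by
  intro candidate_data job_data _ _
  unfold Spec_get_I4_and_F4_points get_I4_and_F4_points get_I4_and_F4_points_alt
  by_cases hg : (!((PySem.Dict.mk candidate_data).get? "final_I" == some "I4")
      || !((PySem.Dict.mk candidate_data).get? "final_F" == some "F4")) = true
  · rw [if_pos hg, if_pos hg]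
  · rw [if_neg hg, if_neg hg]
    simp only []
    rw [← pv_score_eq, ← pv_score_eq]
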